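-- pv_equiv track=rewrite | github.com/brohan/Milestone_1 | Milestone_1_Main.py | move_map
-- ===== SOURCE A (Python) =====
-- def move_map(board):
--     map = {}
--     for row in board:
--         for column in row:
--             map.update({column: 0})
--
--     for i in range(1, 9):
--         for key in map:
--             map[key] = next((i, position.index(key))
--                             for i, position in enumerate(board)
--                             if key in position) #If this gives errors check indentation
--     return map
-- ===== SOURCE B (Python) =====
-- def move_map(board):
--     result = {}
--     for i, row in enumerate(board):
--         for j, val in enumerate(row):
--             if val not in result:
--                 result[val] = (i, j)
--     return result
-- ===== Notes on version B (the rewrite author's own statement) =====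
-- stated objective: faster
-- what changed: B records each value's first (row,col) in one guarded row-major pass, replacing A's key-initialization pass plus 8 redundant rounds of per-key full-board rescans (next over enumerate + list.index).
import Mathlib
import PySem

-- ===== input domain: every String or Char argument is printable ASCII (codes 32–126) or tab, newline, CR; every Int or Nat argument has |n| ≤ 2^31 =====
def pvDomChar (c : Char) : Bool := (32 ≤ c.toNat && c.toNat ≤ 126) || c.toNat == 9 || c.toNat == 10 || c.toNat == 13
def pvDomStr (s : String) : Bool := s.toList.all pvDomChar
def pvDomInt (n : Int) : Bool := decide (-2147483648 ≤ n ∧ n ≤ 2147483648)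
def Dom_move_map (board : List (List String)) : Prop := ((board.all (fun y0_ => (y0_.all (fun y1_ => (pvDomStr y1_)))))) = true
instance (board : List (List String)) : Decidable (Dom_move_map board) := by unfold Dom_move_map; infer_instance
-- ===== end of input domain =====

-- B replaces A's key-initialization pass plus eight rounds of per-key full-board rescans by one
-- guarded row-major pass recording each value's first (row, col).


-- ===== PORT A =====
-- next((i, position.index(key)) for i, position in enumerate(board) if key in position)
def pyFirstOcc (board : List (List String)) (key : String) : Option (Int × Int) :=
  (PySem.List.enumerate board).findSome? (fun p =>
    if key ∈ p.2 then some (p.1, (((PySem.List.index? p.2 key).getD 0 : Nat) : Int)) else none)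

def move_map (board : List (List String)) : List (String × Int × Int) :=
  -- first pass: map.update({column: 0}); the placeholder value 0 never reaches the returned
  -- dict (every key is overwritten below, or the dict is empty), so it is ported as the pair (0, 0)
  let d0 : PySem.Dict String (Int × Int) :=
    board.foldl (fun d row => row.foldl (fun d column => d.insert column (0, 0)) d) PySem.Dict.empty
  -- for i in range(1, 9): for key in map: map[key] = next(...)
  -- the generator always finds a row (every key occurs in the board), so the .getD default is unreachable
  let d := (PySem.List.pyRange 1 9 1).foldl
    (fun d _ => d.keys.foldl (fun d' key => d'.insert key ((pyFirstOcc board key).getD (0, 0))) d) d0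
  d.items

-- ===== PORT B =====
def move_map_alt (board : List (List String)) : List (String × Int × Int) :=
  ((PySem.List.enumerate board).foldl (fun d p =>
    (PySem.List.enumerate p.2).foldl (fun d q =>
      if d.contains q.2 then d else d.insert q.2 (p.1, q.1)) d) PySem.Dict.empty).items

-- ===== PRECONDITION & SPEC =====
def Spec_move_map (board : List (List String)) (out : List (String × Int × Int)) : Prop := out = move_map_alt board
instance (board : List (List String)) (out : List (String × Int × Int)) : Decidable (Spec_move_map board out) := by unfold Spec_move_map; infer_instance

-- ===== CLAIM (what is proved, stated in full; the proofs are below) =====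
def Claim_equal_move_map : Prop := ∀ (board : List (List String)), Dom_move_map board → Spec_move_map board (move_map board)

-- ===== LEMMAS AND PROOFS =====

-- a fold of per-row folds is a fold over the row-major flattening
theorem foldl_foldl_flatMap {α β γ : Type} (h : α → List γ) (g : β → γ → β) :
    ∀ (L : List α) (d : β), L.foldl (fun d x => (h x).foldl g d) d = (L.flatMap h).foldl g d := by
  intro L
  induction L with
  | nil => intro d; simp
  | cons x t ih => intro d; simp [List.foldl_append, ih]

theorem lookup_append {κ ν : Type} [BEq κ] (k : κ) :
    ∀ (l₁ l₂ : List (κ × ν)), (l₁ ++ l₂).lookup k = (l₁.lookup k).or (l₂.lookup k) := by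
  intro l₁ l₂
  induction l₁ with
  | nil => simp [List.lookup]
  | cons p t ih =>
    cases hpk : k == p.1 <;> simp [List.lookup, hpk, ih]

-- A's update round: rewriting every present key's value in place maps the items pointwise
theorem foldl_insert_over_keys (f : String → Int × Int) :
    ∀ (ks : List String) (d : PySem.Dict String (Int × Int)),
      (∀ k ∈ ks, d.contains k = true) →
      (ks.foldl (fun d' k => d'.insert k (f k)) d).items
        = d.items.map (fun p => if p.1 ∈ ks then (p.1, f p.1) else p) := by
  intro ks
  induction ks with
  | nil => intro d _; simp
  | cons k t ih =>
    intro d h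
    have hc : d.contains k = true := h k (by simp)
    rw [List.foldl_cons, ih _ (by
      intro k' hk'
      rw [PySem.Dict.contains_insert]
      simp [h k' (List.mem_cons_of_mem _ hk')])]
    rw [PySem.Dict.items_insert_of_contains _ _ hc, List.map_map]
    apply List.map_congr_left
    intro p _
    by_cases hk : p.1 = k <;> by_cases ht : p.1 ∈ t <;>
      simp [Function.comp, hk, ht]

theorem step_items (f : String → Int × Int) (d : PySem.Dict String (Int × Int)) :
    (d.keys.foldl (fun d' k => d'.insert k (f k)) d).items
      = d.items.map (fun p => (p.1, f p.1)) := by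
  rw [foldl_insert_over_keys f d.keys d
      (fun k hk => (PySem.Dict.contains_iff_mem_keys _ _).mpr hk)]
  apply List.map_congr_left
  intro p hp
  simp [PySem.Dict.mem_keys_of_mem_items _ hp]

-- a nonempty sequence of A's update rounds acts like a single round
theorem foldl_step_items (f : String → Int × Int) :
    ∀ (l : List Int) (d : PySem.Dict String (Int × Int)), l ≠ [] →
      (l.foldl (fun d _ => d.keys.foldl (fun d' k => d'.insert k (f k)) d) d).items
        = d.items.map (fun p => (p.1, f p.1)) := by
  intro l
  induction l with
  | nil => intro d h; exact absurd rfl h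
  | cons x t ih =>
    intro d _
    rw [List.foldl_cons]
    cases t with
    | nil => simpa using step_items f d
    | cons y u =>
      rw [ih _ (by simp), step_items, List.map_map]
      apply List.map_congr_left
      intro p _
      rfl

-- every value of the initialization dict is the placeholder
theorem vals_const (v : Int × Int) :
    ∀ (l : List String) (d : PySem.Dict String (Int × Int)),
      (∀ p ∈ d.items, p.2 = v) →
      ∀ p ∈ (l.foldl (fun d c => d.insert c v) d).items, p.2 = v := by
  intro l
  induction l with
  | nil => intro d h; simpa using h
  | cons c t ih =>
    intro d h
    refine ih _ ?_
    intro p hp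
    rcases (PySem.Dict.mem_items_insert _ _ _ _).mp hp with h1 | h2
    · simp [h1]
    · exact h p h2.1

-- the constant-value initialization dict
theorem init_items (flat : List String) :
    (flat.foldl (fun d c => d.insert c ((0 : Int), (0 : Int))) PySem.Dict.empty).items
      = (PySem.Set.ofList flat).map (fun k => (k, ((0 : Int), (0 : Int)))) := by
  have hk : (flat.foldl (fun d c => d.insert c ((0 : Int), (0 : Int))) PySem.Dict.empty).keys
      = PySem.Set.ofList flat := by
    rw [PySem.Dict.keys_foldl_insert]
    simp [PySem.Set.update_nil_left]
  have hnd : (flat.foldl (fun d c => d.insert c ((0 : Int), (0 : Int))) PySem.Dict.empty).keys.Nodup := by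
    rw [hk]; exact PySem.Set.nodup_ofList flat
  rw [PySem.Dict.items_eq_map_keys _ hnd ((0 : Int), (0 : Int)), hk]
  apply List.map_congr_left
  intro k _
  have hv := vals_const ((0 : Int), (0 : Int)) flat PySem.Dict.empty
    (by intro p hp; simp [PySem.Dict.empty] at hp)
  cases hg : (flat.foldl (fun d c => d.insert c ((0 : Int), (0 : Int))) PySem.Dict.empty).get? k with
  | none => simp [PySem.Dict.getD_of_get?_eq_none _ _ hg]
  | some w =>
    have hw : w = ((0 : Int), (0 : Int)) := hv _ (PySem.Dict.mem_items_of_get?_eq_some _ hg)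
    simp [PySem.Dict.getD_of_get?_eq_some _ _ hg, hw]

-- B's guarded fold: keys, nodup, lookup
theorem bfold_keys :
    ∀ (l : List (String × Int × Int)) (d : PySem.Dict String (Int × Int)),
      (l.foldl (fun d t => if d.contains t.1 then d else d.insert t.1 t.2) d).keys
        = PySem.Set.update d.keys (l.map (·.1)) := by
  intro l
  induction l with
  | nil => intro d; simp [PySem.Set.update_nil]
  | cons t rest ih =>
    intro d
    rw [List.foldl_cons, List.map_cons, PySem.Set.update_cons]
    by_cases hc : d.contains t.1 = true
    · simp only [hc, if_true, ih]
      rw [PySem.Set.add_of_mem ((PySem.Dict.contains_iff_mem_keys _ _).mp hc)]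
    · simp only [hc, Bool.false_eq_true, if_false, ih]
      rw [PySem.Dict.keys_insert_of_not_contains _ _ (by simpa using hc),
        PySem.Set.add_of_not_mem (fun hm => hc ((PySem.Dict.contains_iff_mem_keys _ _).mpr hm))]

theorem bfold_nodup :
    ∀ (l : List (String × Int × Int)) (d : PySem.Dict String (Int × Int)),
      d.keys.Nodup →
      (l.foldl (fun d t => if d.contains t.1 then d else d.insert t.1 t.2) d).keys.Nodup := by
  intro l
  induction l with
  | nil => intro d h; simpa using h
  | cons t rest ih =>
    intro d h
    rw [List.foldl_cons]
    by_cases hc : d.contains t.1 = true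
    · simp only [hc, if_true]; exact ih _ h
    · simp only [hc, Bool.false_eq_true, if_false]
      exact ih _ (PySem.Dict.nodup_keys_insert _ _ _ h)

theorem bfold_get? :
    ∀ (l : List (String × Int × Int)) (d : PySem.Dict String (Int × Int)) (k : String),
      (l.foldl (fun d t => if d.contains t.1 then d else d.insert t.1 t.2) d).get? k
        = (d.get? k).or (l.lookup k) := by
  intro l
  induction l with
  | nil => intro d k; simp [List.lookup]
  | cons t rest ih =>
    intro d k
    rw [List.foldl_cons]
    by_cases hk : t.1 = k
    · subst hk
      by_cases hc : d.contains t.1 = true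
      · simp only [hc, if_true, ih]
        have hs : (d.get? t.1).isSome := by
          rw [← PySem.Dict.contains_eq_isSome_get?]; exact hc
        obtain ⟨v, hv⟩ := Option.isSome_iff_exists.mp hs
        simp [List.lookup, hv]
      · simp only [hc, Bool.false_eq_true, if_false, ih]
        have hnone : d.get? t.1 = none := by
          rw [PySem.Dict.get?_eq_none_iff_contains]; simpa using hc
        simp [List.lookup, PySem.Dict.get?_insert_self, hnone]
    · have hbk : (k == t.1) = false := beq_eq_false_iff_ne.mpr (fun h => hk h.symm)
      by_cases hc : d.contains t.1 = true
      · simp only [hc, if_true, ih]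
        simp [List.lookup, hbk]
      · simp only [hc, Bool.false_eq_true, if_false, ih]
        rw [PySem.Dict.get?_insert_of_ne _ _ (fun h => hk h.symm)]
        simp [List.lookup, hbk]

-- per-row: first match in one enumerated row
theorem row_lookup (i : Int) (k : String) :
    ∀ (r : List String) (j : Int),
      (((PySem.List.enumerate r j).map (fun q => (q.2, (i, q.1)))).lookup k)
        = if k ∈ r then some (i, j + (((PySem.List.index? r k).getD 0 : Nat) : Int)) else none := by
  intro r
  induction r with
  | nil => intro j; simp [PySem.List.enumerate_nil]
  | cons x t ih =>
    intro j
    rw [PySem.List.enumerate_cons, List.map_cons]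
    by_cases hx : x = k
    · subst hx
      rw [PySem.List.index?_cons_self]
      simp [List.lookup]
    · have hkx : (k == x) = false := beq_eq_false_iff_ne.mpr (fun h => hx h.symm)
      rw [PySem.List.index?_cons_of_ne t hx]
      simp only [List.lookup, hkx, ih (j + 1)]
      by_cases ht : k ∈ t
      · obtain ⟨m, hm⟩ := Option.isSome_iff_exists.mp ((PySem.List.index?_isSome_iff t k).mpr ht)
        have hmem : k ∈ x :: t := List.mem_cons_of_mem _ ht
        simp only [ht, if_true, hmem, hm, Option.map_some, Option.getD_some]
        refine congrArg some (congrArg (Prod.mk i) ?_)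
        push_cast
        ring
      · have hmem : ¬ k ∈ x :: t := by
          rw [List.mem_cons]
          rintro (h | h)
          · exact hx h.symm
          · exact ht h
        simp [ht, hmem]

-- A's generator equals the first matching triple of the row-major triple list
theorem occ_eq_lookup (k : String) :
    ∀ (rows : List (List String)) (s : Int),
      ((PySem.List.enumerate rows s).findSome? (fun p =>
        if k ∈ p.2 then some (p.1, (((PySem.List.index? p.2 k).getD 0 : Nat) : Int)) else none))
        = ((PySem.List.enumerate rows s).flatMap (fun p =>
            (PySem.List.enumerate p.2).map (fun q => (q.2, (p.1, q.1))))).lookup k := by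
  intro rows
  induction rows with
  | nil => intro s; simp [PySem.List.enumerate_nil]
  | cons r rest ih =>
    intro s
    rw [PySem.List.enumerate_cons, List.findSome?_cons, List.flatMap_cons, lookup_append,
      row_lookup s k r 0]
    by_cases hk : k ∈ r
    · simp [hk]
    · simpa [hk] using ih (s + 1)

-- row-major keys of the triple list are the flattened board
theorem map_fst_triples :
    ∀ (rows : List (List String)) (s : Int),
      (((PySem.List.enumerate rows s).flatMap (fun p =>
        (PySem.List.enumerate p.2).map (fun q => (q.2, (p.1, q.1))))).map (fun t => t.1))
        = rows.flatMap (fun r => r) := by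
  intro rows
  induction rows with
  | nil => intro s; simp [PySem.List.enumerate_nil]
  | cons r rest ih =>
    intro s
    rw [PySem.List.enumerate_cons, List.flatMap_cons, List.flatMap_cons, List.map_append]
    congr 1
    · rw [List.map_map]
      exact PySem.List.map_snd_enumerate r 0
    · exact ih (s + 1)

-- ===== VERDICT (by name: the statement is the Claim_ definition above) =====
set_option maxHeartbeats 800000 in
theorem move_map_spec : Claim_equal_move_map := by
  intro board _
  unfold Spec_move_map
  have hocc : ∀ k : String, pyFirstOcc board k
      = ((PySem.List.enumerate board).flatMap (fun p =>
          (PySem.List.enumerate p.2).map (fun q => (q.2, (p.1, q.1))))).lookup k := by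
    intro k
    unfold pyFirstOcc
    exact occ_eq_lookup k board 0
  have hA : move_map board = (PySem.Set.ofList (board.flatMap (fun r => r))).map
      (fun k => (k, (pyFirstOcc board k).getD ((0 : Int), (0 : Int)))) := by
    unfold move_map
    rw [foldl_step_items (fun key => (pyFirstOcc board key).getD ((0 : Int), (0 : Int)))
      (PySem.List.pyRange 1 9 1) _ (by decide)]
    rw [foldl_foldl_flatMap (fun (row : List String) => row)
      (fun (d : PySem.Dict String (Int × Int)) (column : String) => d.insert column ((0 : Int), (0 : Int)))
      board PySem.Dict.empty]
    rw [init_items, List.map_map]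
    apply List.map_congr_left
    intro p _
    rfl
  have hBdict :
      ((PySem.List.enumerate board).foldl (fun d p =>
        (PySem.List.enumerate p.2).foldl (fun d q =>
          if d.contains q.2 then d else d.insert q.2 (p.1, q.1)) d) PySem.Dict.empty)
      = (((PySem.List.enumerate board).flatMap (fun p =>
          (PySem.List.enumerate p.2).map (fun q => (q.2, (p.1, q.1))))).foldl
          (fun d t => if d.contains t.1 then d else d.insert t.1 t.2) PySem.Dict.empty) := by
    rw [← foldl_foldl_flatMap]
    apply PySem.List.foldl_congr_mem
    intro d p _
    rw [List.foldl_map]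
  have hB : move_map_alt board = (PySem.Set.ofList (board.flatMap (fun r => r))).map
      (fun k => (k, (pyFirstOcc board k).getD ((0 : Int), (0 : Int)))) := by
    unfold move_map_alt
    rw [hBdict]
    have hnd : (((PySem.List.enumerate board).flatMap (fun p =>
        (PySem.List.enumerate p.2).map (fun q => (q.2, (p.1, q.1))))).foldl
        (fun d t => if d.contains t.1 then d else d.insert t.1 t.2) PySem.Dict.empty).keys.Nodup := by
      apply bfold_nodup
      rw [PySem.Dict.keys_empty]
      exact List.nodup_nil
    rw [PySem.Dict.items_eq_map_keys _ hnd ((0 : Int), (0 : Int))]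
    rw [bfold_keys, PySem.Dict.keys_empty, PySem.Set.update_nil_left, map_fst_triples board 0]
    apply List.map_congr_left
    intro k _
    rw [PySem.Dict.getD_eq_get?_getD, bfold_get?, PySem.Dict.get?_empty, hocc k]
    rfl
  rw [hA, hB]
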